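-- pv_equiv track=rewrite | github.com/wyk18703232953/myResearch | codeComplex/data copy/filteredData/python/cubic/python_cubic_0120.py | solve_single_case
-- ===== SOURCE A (Python) =====
-- def check(s, t1, t2):
--     s1 = len(t1)
--     s2 = len(t2)
--     n = len(s)
--     dp = [[-1] * (s1 + 1) for _ in range(n + 1)]
--     dp[0][0] = 0
--     for i in range(n):
--         for j in range(s1 + 1):
--             if dp[i][j] >= 0:
--                 if j < s1 and t1[j] == s[i]:
--                     if dp[i + 1][j + 1] < dp[i][j]:
--                         dp[i + 1][j + 1] = dp[i][j]
--                 if dp[i][j] < s2 and t2[dp[i][j]] == s[i]: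
--                     if dp[i + 1][j] < dp[i][j] + 1:
--                         dp[i + 1][j] = dp[i][j] + 1
--             if dp[i + 1][j] < dp[i][j]:
--                 dp[i + 1][j] = dp[i][j]
--     return dp[n][s1] == s2
--
-- def solve_single_case(s, t):
--     le = len(t)
--     for i in range(le):
--         t1 = t[:i]
--         t2 = t[i:]
--         if check(s, t1, t2):
--             return "YES"
--     return "NO"
-- ===== SOURCE B (Python) =====
-- def _splittable(s, t1, t2):
--     # set of reachable (j, v): j chars of t1 and v chars of t2 matched so far
--     states = {(0, 0)}
--     for c in s:
--         new = set(states)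
--         for (j, v) in states:
--             if j < len(t1) and t1[j] == c:
--                 new.add((j + 1, v))
--             if v < len(t2) and t2[v] == c:
--                 new.add((j, v + 1))
--         states = new
--     return (len(t1), len(t2)) in states
--
-- def solve_single_case(s, t):
--     for i in range(len(t)):
--         if _splittable(s, t[:i], t[i:]):
--             return "YES"
--     return "NO"
-- ===== Notes on version B (the rewrite author's own statement) =====
-- stated objective: alternative
-- what changed: Per split point, A fills a bottom-up (len(s)+1) x (len(t1)+1) table storing for each t1-progress the maximum t2-progress reached; B instead grows a set of all reachable (t1-progress, t2-progress) state pairs in one forward pass over s and tests membership of the goal state at the end (slower by up to a factor len(t), not a speed rewrite).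
import Mathlib
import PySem

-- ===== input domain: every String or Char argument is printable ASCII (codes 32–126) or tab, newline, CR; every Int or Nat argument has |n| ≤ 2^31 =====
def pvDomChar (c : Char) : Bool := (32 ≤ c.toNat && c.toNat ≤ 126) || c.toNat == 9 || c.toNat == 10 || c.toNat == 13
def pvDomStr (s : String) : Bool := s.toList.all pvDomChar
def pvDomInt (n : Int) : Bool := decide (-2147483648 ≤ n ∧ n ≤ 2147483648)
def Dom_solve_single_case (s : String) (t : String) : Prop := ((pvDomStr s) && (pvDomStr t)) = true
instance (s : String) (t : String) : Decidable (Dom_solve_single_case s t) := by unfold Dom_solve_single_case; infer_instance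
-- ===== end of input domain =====

-- B replaces A's bottom-up max-progress DP table with a reachable-(t1,t2)-progress state-set search per split; alternative algorithm (B tracks whole state sets, up to a factor |t| more work).


-- ===== PORT A =====
-- dp[i][j] read/write; every index A uses is nonnegative and in range, so Nat-indexed getD/set is exact.
def pvGet2 (dp : List (List Int)) (i j : Nat) : Int := (dp.getD i []).getD j 0
def pvSet2 (dp : List (List Int)) (i j : Nat) (x : Int) : List (List Int) := dp.set i ((dp.getD i []).set j x)

-- body of A's inner loop over j (the statements inside 'for j in range(s1 + 1)'), step for step
def innerBody (s t1 t2 : List Char) (i : Nat) (dp0 : List (List Int)) (j : Nat) : List (List Int) :=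
  let dp :=
    if 0 ≤ pvGet2 dp0 i j then
      -- if j < s1 and t1[j] == s[i]: if dp[i+1][j+1] < dp[i][j]: dp[i+1][j+1] = dp[i][j]
      let dp1 := if j < t1.length ∧ t1.getD j ' ' = s.getD i ' ' then
          (if pvGet2 dp0 (i+1) (j+1) < pvGet2 dp0 i j then pvSet2 dp0 (i+1) (j+1) (pvGet2 dp0 i j) else dp0)
        else dp0
      -- if dp[i][j] < s2 and t2[dp[i][j]] == s[i]: if dp[i+1][j] < dp[i][j]+1: dp[i+1][j] = dp[i][j]+1
      -- (dp[i][j] ≥ 0 is guaranteed by the enclosing guard, so .toNat is exact here)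
      if pvGet2 dp1 i j < (t2.length : Int) ∧ t2.getD (pvGet2 dp1 i j).toNat ' ' = s.getD i ' ' then
          (if pvGet2 dp1 (i+1) j < pvGet2 dp1 i j + 1 then pvSet2 dp1 (i+1) j (pvGet2 dp1 i j + 1) else dp1)
        else dp1
    else dp0
  -- if dp[i+1][j] < dp[i][j]: dp[i+1][j] = dp[i][j]
  if pvGet2 dp (i+1) j < pvGet2 dp i j then pvSet2 dp (i+1) j (pvGet2 dp i j) else dp

def outerBody (s t1 t2 : List Char) (dp : List (List Int)) (i : Nat) : List (List Int) :=
  (List.range (t1.length + 1)).foldl (innerBody s t1 t2 i) dp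

-- def check(s, t1, t2)
def checkA (s t1 t2 : List Char) : Bool :=
  let dp0 : List (List Int) := (List.range (s.length + 1)).map (fun _ => List.replicate (t1.length + 1) (-1))
  let dp1 := pvSet2 dp0 0 0 0
  let dp := (List.range s.length).foldl (outerBody s t1 t2) dp1
  decide (pvGet2 dp s.length t1.length = (t2.length : Int))

-- for i in range(le): t[:i], t[i:]  (0 ≤ i ≤ len t, so the slices are take/drop); early return = find?
def solve_single_case (s : String) (t : String) : String :=
  match (List.range t.toList.length).find?
      (fun i => checkA s.toList (t.toList.take i) (t.toList.drop i)) with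
  | some _ => "YES"
  | none => "NO"

-- ===== PORT B =====
-- body of B's inner 'for (j, v) in states' loop
def addBody (t1 t2 : List Char) (c : Char) (nw : PySem.Set (Int × Int)) (p : Int × Int) : PySem.Set (Int × Int) :=
  let nw1 := if p.1 < (t1.length : Int) ∧ PySem.List.pyGet? t1 p.1 = some c then PySem.Set.add nw (p.1 + 1, p.2) else nw
  if p.2 < (t2.length : Int) ∧ PySem.List.pyGet? t2 p.2 = some c then PySem.Set.add nw1 (p.1, p.2 + 1) else nw1

-- one character step: new = set(states); for (j,v) in states: …
def stepSet (t1 t2 : List Char) (c : Char) (states : PySem.Set (Int × Int)) : PySem.Set (Int × Int) :=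
  states.foldl (addBody t1 t2 c) states

-- def _splittable(s, t1, t2)
def splittableB (s t1 t2 : List Char) : Bool :=
  let final := s.foldl (fun states c => stepSet t1 t2 c states) (PySem.Set.ofList [((0 : Int), (0 : Int))])
  decide (((t1.length : Int), (t2.length : Int)) ∈ final)

def solve_single_case_alt (s : String) (t : String) : String :=
  match (List.range t.toList.length).find?
      (fun i => splittableB s.toList (t.toList.take i) (t.toList.drop i)) with
  | some _ => "YES"
  | none => "NO"

-- ===== PRECONDITION & SPEC =====
def Spec_solve_single_case (s : String) (t : String) (out : String) : Prop := out = solve_single_case_alt s t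
instance (s : String) (t : String) (out : String) : Decidable (Spec_solve_single_case s t out) := by unfold Spec_solve_single_case; infer_instance

-- ===== CLAIM (what is proved, stated in full; the proofs are below) =====
def Claim_equal_solve_single_case : Prop := ∀ (s : String) (t : String), Dom_solve_single_case s t → Spec_solve_single_case s t (solve_single_case s t)

-- ===== LEMMAS AND PROOFS =====

-- ---- functional characterization of A's row update ----
-- contribution written into slot j by the t1-branch of iteration j-1
def a1F (t1 : List Char) (c : Char) (r : List Int) (j : Nat) : Int :=
  if 0 < j ∧ 0 ≤ r.getD (j-1) 0 ∧ j - 1 < t1.length ∧ t1.getD (j-1) ' ' = c then r.getD (j-1) 0 else -1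

-- contribution written into slot j by the t2-branch of iteration j
def a2F (t2 : List Char) (c : Char) (r : List Int) (j : Nat) : Int :=
  if 0 ≤ r.getD j 0 ∧ r.getD j 0 < (t2.length : Int) ∧ t2.getD (r.getD j 0).toNat ' ' = c then r.getD j 0 + 1 else -1

def rowF (t1 t2 : List Char) (c : Char) (r : List Int) (j : Nat) : Int :=
  max (max (a1F t1 c r j) (a2F t2 c r j)) (r.getD j 0)

def stepRow (t1 t2 : List Char) (c : Char) (r : List Int) : List Int :=
  (List.range (t1.length + 1)).map (rowF t1 t2 c r)

def rowsA (t1 t2 : List Char) (s : List Char) : List Int :=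
  s.foldl (fun r c => stepRow t1 t2 c r) ((List.replicate (t1.length + 1) (-1 : Int)).set 0 0)

-- row i+1 after the first j iterations of the inner loop
def partRow (t1 t2 : List Char) (c : Char) (r : List Int) (j : Nat) : List Int :=
  (List.range (t1.length + 1)).map (fun k => if k < j then rowF t1 t2 c r k else if k = j then a1F t1 c r k else -1)

def Adv (t1 t2 : List Char) (c : Char) (q p : Int × Int) : Prop :=
  (q.1 < (t1.length : Int) ∧ PySem.List.pyGet? t1 q.1 = some c ∧ p = (q.1 + 1, q.2)) ∨
  (q.2 < (t2.length : Int) ∧ PySem.List.pyGet? t2 q.2 = some c ∧ p = (q.1, q.2 + 1))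
lemma mem_addBody (t1 t2 : List Char) (c : Char) (nw : PySem.Set (Int × Int)) (q p : Int × Int) :
    p ∈ addBody t1 t2 c nw q ↔ p ∈ nw ∨ Adv t1 t2 c q p := by
  unfold addBody Adv
  split_ifs with h1 h2 h2 <;> simp [PySem.Set.mem_add] <;> tauto

lemma mem_foldl_addBody (t1 t2 : List Char) (c : Char) (l : List (Int × Int))
    (acc : PySem.Set (Int × Int)) (p : Int × Int) :
    p ∈ l.foldl (addBody t1 t2 c) acc ↔ p ∈ acc ∨ ∃ q ∈ l, Adv t1 t2 c q p := by
  induction l generalizing acc with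
  | nil => simp
  | cons x xs ih => simp [List.foldl_cons, ih, mem_addBody]; tauto

lemma mem_stepSet' (t1 t2 : List Char) (c : Char) (S : PySem.Set (Int × Int)) (p : Int × Int) :
    p ∈ stepSet t1 t2 c S ↔ p ∈ S ∨ ∃ q ∈ S, Adv t1 t2 c q p := by
  unfold stepSet; rw [mem_foldl_addBody]
def maxVAux (S : List (Int × Int)) (j : Int) (m : Int) : Int :=
  S.foldl (fun m p => if p.1 = j then max m p.2 else m) m

def maxV (S : List (Int × Int)) (j : Int) : Int := maxVAux S j (-1)

lemma le_maxVAux_init (S : List (Int × Int)) (j m : Int) : m ≤ maxVAux S j m := by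
  induction S generalizing m with
  | nil => simp [maxVAux]
  | cons x xs ih =>
    simp only [maxVAux, List.foldl_cons]
    split_ifs with h
    · exact le_trans (le_max_left _ _) (ih (max m x.2))
    · exact ih m

lemma le_maxVAux_of_mem (S : List (Int × Int)) (j m : Int) (q : Int × Int)
    (hq : q ∈ S) (hj : q.1 = j) : q.2 ≤ maxVAux S j m := by
  induction S generalizing m with
  | nil => simp at hq
  | cons x xs ih =>
    simp only [maxVAux, List.foldl_cons]
    rcases List.mem_cons.mp hq with h | h
    · subst h; rw [if_pos hj]
      exact le_trans (le_max_right _ _) (le_maxVAux_init xs j _)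
    · split_ifs with hx
      · exact ih (max m x.2) h
      · exact ih m h

lemma maxVAux_cases (S : List (Int × Int)) (j m : Int) :
    maxVAux S j m = m ∨ (j, maxVAux S j m) ∈ S := by
  induction S generalizing m with
  | nil => left; simp [maxVAux]
  | cons x xs ih =>
    simp only [maxVAux, List.foldl_cons]
    split_ifs with h
    · rcases ih (max m x.2) with h2 | h2
      · rcases le_total x.2 m with hc | hc
        · left; simpa [max_eq_left hc] using h2
        · right
          have : maxVAux xs j (max m x.2) = x.2 := by simpa [max_eq_right hc] using h2
          show (j, maxVAux xs j (max m x.2)) ∈ x :: xs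
          rw [this, ← h]
          exact List.mem_cons_self
      · right; exact List.mem_cons_of_mem _ h2
    · rcases ih m with h2 | h2
      · left; exact h2
      · right; exact List.mem_cons_of_mem _ h2
def RelInv (t1 t2 : List Char) (r : List Int) (S : List (Int × Int)) : Prop :=
  (∀ j : Nat, j ≤ t1.length → r.getD j 0 = maxV S (j : Int)) ∧
  (∀ p ∈ S, 0 ≤ p.1 ∧ p.1 ≤ (t1.length : Int) ∧ 0 ≤ p.2 ∧ p.2 ≤ (t2.length : Int)) ∧
  (∀ p ∈ S, 0 < p.2 → (p.1, p.2 - 1) ∈ S)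
lemma neg_one_le_maxV (S : List (Int × Int)) (j : Int) : -1 ≤ maxV S j := le_maxVAux_init S j (-1)

lemma maxV_cases (S : List (Int × Int)) (j : Int) : maxV S j = -1 ∨ (j, maxV S j) ∈ S := maxVAux_cases S j (-1)

lemma le_maxV_of_mem (S : List (Int × Int)) (j : Int) (q : Int × Int) (hq : q ∈ S) (hj : q.1 = j) :
    q.2 ≤ maxV S j := le_maxVAux_of_mem S j (-1) q hq hj

lemma maxV_le (S : List (Int × Int)) (j M : Int) (h1 : -1 ≤ M)
    (h2 : ∀ q ∈ S, q.1 = j → q.2 ≤ M) : maxV S j ≤ M := by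
  rcases maxV_cases S j with h | h
  · omega
  · exact h2 _ h rfl

lemma maxV_mono (S T : List (Int × Int)) (j : Int) (h : ∀ q ∈ S, q ∈ T) : maxV S j ≤ maxV T j := by
  rcases maxV_cases S j with hc | hc
  · rw [hc]; exact neg_one_le_maxV T j
  · exact le_maxV_of_mem T j _ (h _ hc) rfl

lemma RelInv_init' (t1 t2 : List Char) :
    RelInv t1 t2 ((List.replicate (t1.length + 1) (-1 : Int)).set 0 0) [((0 : Int), (0 : Int))] := by
  refine ⟨?_, ?_, ?_⟩
  · intro j hj
    have : maxV [((0 : Int), (0 : Int))] (j : Int) = if (0 : Int) = (j : Int) then 0 else -1 := by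
      simp only [maxV, maxVAux, List.foldl_cons, List.foldl_nil]
      split_ifs with h <;> simp
    rw [this]
    rcases Nat.eq_zero_or_pos j with h | h
    · subst h; simp
    · rw [if_neg (by omega), List.getD_eq_getElem?_getD]
      rw [List.getElem?_set_ne (by omega)]
      simp [List.getElem?_replicate, Nat.lt_succ_of_le hj]
  · intro p hp; simp at hp; subst hp; simp
  · intro p hp; simp at hp; subst hp; simp

lemma RelInv_final' (t1 t2 : List Char) (r : List Int) (S : List (Int × Int)) (h : RelInv t1 t2 r S) :
    (r.getD t1.length 0 = (t2.length : Int)) ↔ ((t1.length : Int), (t2.length : Int)) ∈ S := by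
  obtain ⟨hrow, hbound, hdown⟩ := h
  rw [hrow t1.length le_rfl]
  constructor
  · intro he
    rcases maxV_cases S (t1.length : Int) with hc | hc
    · omega
    · rw [he] at hc; exact hc
  · intro hm
    have h1 : (t2.length : Int) ≤ maxV S (t1.length : Int) := le_maxV_of_mem S _ _ hm rfl
    have h2 : maxV S (t1.length : Int) ≤ (t2.length : Int) := by
      apply maxV_le _ _ _ (by omega)
      intro q hq _; exact (hbound q hq).2.2.2
    omega
lemma pyGet?_eq_some_iff_getD (xs : List Char) (v : Int) (c : Char) (h0 : 0 ≤ v) (h1 : v < (xs.length : Int)) :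
    (PySem.List.pyGet? xs v = some c) ↔ xs.getD v.toNat ' ' = c := by
  have hlt : v.toNat < xs.length := by omega
  rw [PySem.List.pyGet?_of_nonneg xs h0]
  simp [List.getElem?_eq_getElem hlt, List.getD_eq_getElem?_getD]

lemma neg_one_le_a1F (t1 : List Char) (c : Char) (r : List Int) (j : Nat) : -1 ≤ a1F t1 c r j := by
  unfold a1F; split_ifs with h
  · omega
  · exact le_rfl

lemma stepRow_getD (t1 t2 : List Char) (c : Char) (r : List Int) (j : Nat) (hj : j ≤ t1.length) :
    (stepRow t1 t2 c r).getD j 0 = rowF t1 t2 c r j := by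
  simp [stepRow, List.getD_eq_getElem?_getD, List.getElem?_range, Nat.lt_succ_of_le hj]

lemma RelInv_step' (t1 t2 : List Char) (c : Char) (r : List Int) (S : PySem.Set (Int × Int))
    (h : RelInv t1 t2 r S) : RelInv t1 t2 (stepRow t1 t2 c r) (stepSet t1 t2 c S) := by
  obtain ⟨hrow, hbound, hdown⟩ := h
  have hsub : ∀ q ∈ S, q ∈ stepSet t1 t2 c S := fun q hq => (mem_stepSet' t1 t2 c S q).mpr (Or.inl hq)
  refine ⟨?_, ?_, ?_⟩
  · intro j hj
    rw [stepRow_getD t1 t2 c r j hj]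
    apply le_antisymm
    · -- rowF ≤ maxV S'
      unfold rowF
      apply max_le (max_le ?_ ?_) ?_
      · -- a1F
        unfold a1F; split_ifs with hc
        · obtain ⟨hj0, hge, hlen, hch⟩ := hc
          rw [hrow (j-1) (by omega)] at hge ⊢
          rcases maxV_cases S ((j-1 : Nat) : Int) with hm | hm
          · omega
          · apply le_maxV_of_mem _ _ (((j-1 : Nat) : Int) + 1, maxV S ((j-1 : Nat) : Int)) _ (by push_cast; omega)
            apply (mem_stepSet' t1 t2 c S _).mpr
            refine Or.inr ⟨(((j-1 : Nat) : Int), maxV S ((j-1 : Nat) : Int)), hm, Or.inl ⟨by push_cast; omega, ?_, rfl⟩⟩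
            rw [pyGet?_eq_some_iff_getD _ _ _ (by push_cast; omega) (by push_cast; omega)]
            simpa using hch
        · exact neg_one_le_maxV _ _
      · -- a2F
        unfold a2F; split_ifs with hc
        · obtain ⟨hge, hlen, hch⟩ := hc
          rw [hrow j hj] at hge hlen hch ⊢
          rcases maxV_cases S (j : Int) with hm | hm
          · omega
          · apply le_maxV_of_mem _ _ ((j : Int), maxV S (j : Int) + 1) _ rfl
            apply (mem_stepSet' t1 t2 c S _).mpr
            refine Or.inr ⟨((j : Int), maxV S (j : Int)), hm, Or.inr ⟨hlen, ?_, rfl⟩⟩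
            rw [pyGet?_eq_some_iff_getD _ _ _ hge hlen]
            exact hch
        · exact neg_one_le_maxV _ _
      · rw [hrow j hj]; exact maxV_mono _ _ _ hsub
    · -- maxV S' ≤ rowF
      apply maxV_le
      · have := neg_one_le_a1F t1 c r j
        unfold rowF; omega
      · intro q hq hq1
        rcases (mem_stepSet' t1 t2 c S q).mp hq with hqS | ⟨w, hw, hadv⟩
        · have : q.2 ≤ maxV S (j : Int) := le_maxV_of_mem _ _ _ hqS hq1
          rw [← hrow j hj] at this
          unfold rowF; omega
        · rcases hadv with ⟨hlt, hch, hqe⟩ | ⟨hlt, hch, hqe⟩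
          · -- t1 advance
            have hw1 : w.1 = (j : Int) - 1 := by rw [hqe] at hq1; simp at hq1; omega
            obtain ⟨hb1, hb2, hb3, hb4⟩ := hbound w hw
            have hj0 : 0 < j := by omega
            have hwn : w.1 = ((j - 1 : Nat) : Int) := by push_cast; omega
            have hmx : w.2 ≤ maxV S ((j-1 : Nat) : Int) := le_maxV_of_mem _ _ _ hw hwn
            have hge : 0 ≤ r.getD (j-1) 0 := by rw [hrow (j-1) (by omega)]; omega
            have hchD : t1.getD (j-1) ' ' = c := by
              have h2 := (pyGet?_eq_some_iff_getD t1 w.1 c hb1 hlt).mp hch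
              rw [hwn] at h2; simpa using h2
            have ha1 : a1F t1 c r j = r.getD (j-1) 0 := by
              unfold a1F; rw [if_pos ⟨hj0, hge, by omega, hchD⟩]
            have : q.2 = w.2 := by rw [hqe]
            rw [this]
            have : w.2 ≤ a1F t1 c r j := by rw [ha1, hrow (j-1) (by omega)]; exact hmx
            unfold rowF; omega
          · -- t2 advance
            have hw1 : w.1 = (j : Int) := by rw [hqe] at hq1; simpa using hq1
            obtain ⟨hb1, hb2, hb3, hb4⟩ := hbound w hw
            have hmx : w.2 ≤ maxV S (j : Int) := le_maxV_of_mem _ _ _ hw hw1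
            have hq2 : q.2 = w.2 + 1 := by rw [hqe]
            rcases eq_or_lt_of_le hmx with he | hlt2
            · -- w.2 is the maximum: a2F fires
              have ha2 : a2F t2 c r j = r.getD j 0 + 1 := by
                unfold a2F
                rw [if_pos ?_]
                refine ⟨?_, ?_, ?_⟩
                · rw [hrow j hj]; omega
                · rw [hrow j hj]; omega
                · rw [hrow j hj, ← he]
                  rw [← pyGet?_eq_some_iff_getD t2 w.2 c hb3 hlt]
                  exact hch
              have : q.2 ≤ a2F t2 c r j := by rw [ha2, hrow j hj]; omega
              unfold rowF; omega
            · have : q.2 ≤ maxV S (j : Int) := by omega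
              rw [← hrow j hj] at this
              unfold rowF; omega
  · intro p hp
    rcases (mem_stepSet' t1 t2 c S p).mp hp with hpS | ⟨w, hw, hadv⟩
    · exact hbound p hpS
    · obtain ⟨hb1, hb2, hb3, hb4⟩ := hbound w hw
      rcases hadv with ⟨hlt, _, hpe⟩ | ⟨hlt, _, hpe⟩ <;> rw [hpe] <;> refine ⟨?_, ?_, ?_, ?_⟩ <;> simp <;> omega
  · intro p hp hp2
    rcases (mem_stepSet' t1 t2 c S p).mp hp with hpS | ⟨w, hw, hadv⟩
    · exact hsub _ (hdown p hpS hp2)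
    · rcases hadv with ⟨hlt, hch, hpe⟩ | ⟨hlt, hch, hpe⟩
      · have hw2 : 0 < w.2 := by rw [hpe] at hp2; simpa using hp2
        have hdw : (w.1, w.2 - 1) ∈ S := hdown w hw hw2
        apply (mem_stepSet' t1 t2 c S _).mpr
        refine Or.inr ⟨(w.1, w.2 - 1), hdw, Or.inl ⟨by simpa using hlt, by simpa using hch, ?_⟩⟩
        rw [hpe]
      · have : (p.1, p.2 - 1) = w := by rw [hpe]; simp
        rw [this]; exact hsub _ hw
-- ---- table access helpers ----
lemma getD_set_row_ne (dp : List (List Int)) (a b : Nat) (P : List Int) (h : a ≠ b) :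
    (dp.set a P).getD b [] = dp.getD b [] := by
  simp [List.getD_eq_getElem?_getD, List.getElem?_set_ne h]

lemma getD_set_row_self (dp : List (List Int)) (a : Nat) (P : List Int) (h : a < dp.length) :
    (dp.set a P).getD a [] = P := by
  simp [List.getD_eq_getElem?_getD, List.getElem?_set_self, h]

lemma get2_set_ne (dp : List (List Int)) (a b k : Nat) (P : List Int) (h : a ≠ b) :
    pvGet2 (dp.set a P) b k = pvGet2 dp b k := by
  unfold pvGet2; rw [getD_set_row_ne dp a b P h]

lemma set_row_getD_self (dp : List (List Int)) (a : Nat) (h : a < dp.length) :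
    dp.set a (dp.getD a []) = dp := by
  rw [List.getD_eq_getElem?_getD, List.getElem?_eq_getElem h]
  exact List.set_getElem_self h

-- 'if cur < cand then write else skip' writes the max
lemma condSet (dp : List (List Int)) (a k : Nat) (cand : Int) (ha : a < dp.length)
    (hk : k < (dp.getD a []).length) :
    (if pvGet2 dp a k < cand then pvSet2 dp a k cand else dp)
      = dp.set a ((dp.getD a []).set k (max ((dp.getD a []).getD k 0) cand)) := by
  unfold pvGet2 pvSet2
  split_ifs with h
  · rw [max_eq_right (le_of_lt h)]
  · rw [max_eq_left (not_lt.mp h)]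
    have h2 : (dp.getD a []).set k ((dp.getD a []).getD k 0) = dp.getD a [] := by
      have hk' : k < (dp[a]?.getD []).length := by simpa [List.getD_eq_getElem?_getD] using hk
      simp [List.getD_eq_getElem?_getD, List.getElem?_eq_getElem hk', List.set_getElem_self hk']
    rw [h2, set_row_getD_self dp a ha]

lemma partRow_length (t1 t2 : List Char) (c : Char) (r : List Int) (j : Nat) :
    (partRow t1 t2 c r j).length = t1.length + 1 := by simp [partRow]

lemma partRow_getD (t1 t2 : List Char) (c : Char) (r : List Int) (j k : Nat) (hk : k ≤ t1.length) :
    (partRow t1 t2 c r j).getD k 0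
      = if k < j then rowF t1 t2 c r k else if k = j then a1F t1 c r k else -1 := by
  simp [partRow, List.getD_eq_getElem?_getD, Nat.lt_succ_of_le hk]
lemma condSet' (dp : List (List Int)) (i : Nat) (Q : List Int) (k : Nat) (cand : Int)
    (hi : i + 1 < dp.length) (hk : k < Q.length) :
    (if pvGet2 (dp.set (i+1) Q) (i+1) k < cand then pvSet2 (dp.set (i+1) Q) (i+1) k cand
     else dp.set (i+1) Q)
      = dp.set (i+1) (Q.set k (max (Q.getD k 0) cand)) := by
  rw [condSet (dp.set (i+1) Q) (i+1) k cand (by simpa using hi)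
      (by rw [getD_set_row_self dp _ Q hi]; exact hk)]
  rw [getD_set_row_self dp _ Q hi, List.set_set]

lemma partRow_getElem? (t1 t2 : List Char) (c : Char) (r : List Int) (j k : Nat) :
    (partRow t1 t2 c r j)[k]?
      = if k < t1.length + 1
        then some (if k < j then rowF t1 t2 c r k else if k = j then a1F t1 c r k else -1)
        else none := by
  by_cases hkn : k < t1.length + 1
  · rw [if_pos hkn]; unfold partRow
    rw [List.getElem?_map, List.getElem?_range hkn, Option.map_some]
  · rw [if_neg hkn]; unfold partRow
    rw [List.getElem?_map, List.getElem?_eq_none (by simpa using hkn), Option.map_none]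

-- one inner-loop iteration: slot j becomes rowF, slot j+1 receives the t1-contribution
lemma rowExt (t1 t2 : List Char) (c : Char) (r : List Int) (j : Nat) (hj : j ≤ t1.length) (x y : Int)
    (hx : x = a1F t1 c r (j+1)) (hy : y = rowF t1 t2 c r j) :
    ((partRow t1 t2 c r j).set (j+1) x).set j y = partRow t1 t2 c r (j+1) := by
  subst hx; subst hy
  apply List.ext_getElem?
  intro k
  rw [List.getElem?_set, List.getElem?_set, partRow_getElem?, partRow_getElem?]
  simp only [List.length_set, partRow_length]
  by_cases e1 : k = j
  · subst e1; rw [if_pos rfl, if_pos (by omega), if_pos (by omega), if_pos (by omega)]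
  · rw [if_neg (by omega)]
    by_cases e2 : k = j + 1
    · subst e2
      rw [if_pos rfl]
      by_cases h : j + 1 < t1.length + 1
      · rw [if_pos h, if_pos h, if_neg (show ¬(j+1 < j+1) by omega), if_pos rfl]
      · rw [if_neg h, if_neg h]
    · rw [if_neg (by omega)]
      by_cases h : k < t1.length + 1
      · rw [if_pos h, if_pos h]
        by_cases h2 : k < j
        · rw [if_pos h2, if_pos (show k < j+1 by omega)]
        · rw [if_neg h2, if_neg e1, if_neg (show ¬(k < j+1) by omega), if_neg e2]
      · rw [if_neg h, if_neg h]

lemma setP_j1 (t1 t2 : List Char) (c : Char) (r : List Int) (j : Nat) (hj : j ≤ t1.length) :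
    (partRow t1 t2 c r j).set (j+1) (-1) = partRow t1 t2 c r j := by
  by_cases h : j + 1 < t1.length + 1
  · have hlt : j + 1 < (partRow t1 t2 c r j).length := by rw [partRow_length]; exact h
    have h2 : (partRow t1 t2 c r j)[j+1]'hlt = -1 := by
      have h3 := List.getElem?_eq_getElem hlt
      rw [partRow_getElem? t1 t2 c r j (j+1), if_pos h, if_neg (by omega), if_neg (by omega)] at h3
      exact (Option.some_injective _ h3.symm)
    calc (partRow t1 t2 c r j).set (j+1) (-1)
        = (partRow t1 t2 c r j).set (j+1) ((partRow t1 t2 c r j)[j+1]'hlt) := by rw [h2]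
      _ = partRow t1 t2 c r j := List.set_getElem_self hlt
  · exact List.set_eq_of_length_le (by rw [partRow_length]; omega)

lemma getD_partRow_j (t1 t2 : List Char) (c : Char) (r : List Int) (j : Nat) (hj : j ≤ t1.length) :
    (partRow t1 t2 c r j).getD j 0 = a1F t1 c r j := by
  rw [partRow_getD t1 t2 c r j j hj, if_neg (by omega), if_pos rfl]

lemma innerBody_step (s t1 t2 : List Char) (i : Nat) (dp : List (List Int)) (r : List Int) (j : Nat)
    (hi : i + 1 < dp.length) (hri : dp.getD i [] = r) (hj : j ≤ t1.length) :
    innerBody s t1 t2 i (dp.set (i+1) (partRow t1 t2 (s.getD i ' ') r j)) j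
      = dp.set (i+1) (partRow t1 t2 (s.getD i ' ') r (j+1)) := by
  have hne : i + 1 ≠ i := by omega
  have key1 : ∀ (Q : List Int) (k : Nat), pvGet2 (dp.set (i+1) Q) i k = r.getD k 0 := by
    intro Q k; rw [get2_set_ne dp (i+1) i k Q hne]; unfold pvGet2; rw [hri]
  set c := s.getD i ' ' with hc
  set P := partRow t1 t2 c r j with hP
  have hlenP : P.length = t1.length + 1 := partRow_length t1 t2 c r j
  have hPj : P.getD j 0 = a1F t1 c r j := getD_partRow_j t1 t2 c r j hj
  unfold innerBody
  simp only [key1]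
  by_cases h1 : (0:Int) ≤ r.getD j 0
  · rw [if_pos h1]
    by_cases h2 : j < t1.length ∧ t1.getD j ' ' = c
    · rw [if_pos h2]
      have hx : r.getD j 0 = a1F t1 c r (j+1) := by
        unfold a1F
        rw [if_pos ⟨by omega, by simpa using h1, by simpa using h2.1, by simpa using h2.2⟩]
        simp only [Nat.add_sub_cancel]
      rw [condSet' dp i P (j+1) (r.getD j 0) hi (by omega)]
      have hPj1 : P.getD (j+1) 0 = -1 := by
        rw [hP, partRow_getD t1 t2 c r j (j+1) (by omega), if_neg (by omega), if_neg (by omega)]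
      rw [hPj1, max_eq_right (by omega)]
      have hP1j : (P.set (j+1) (r.getD j 0)).getD j 0 = a1F t1 c r j := by
        rw [List.getD_eq_getElem?_getD, List.getElem?_set, if_neg (by omega),
          ← List.getD_eq_getElem?_getD, hPj]
      simp only [key1]
      by_cases h3 : r.getD j 0 < (t2.length : Int) ∧ t2.getD (r.getD j 0).toNat ' ' = c
      · rw [if_pos h3,
          condSet' dp i (P.set (j+1) (r.getD j 0)) j (r.getD j 0 + 1) hi (by simp [hlenP]; omega),
          hP1j]
        simp only [key1]
        rw [condSet' dp i ((P.set (j+1) (r.getD j 0)).set j (max (a1F t1 c r j) (r.getD j 0 + 1)))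
              j (r.getD j 0) hi (by simp [hlenP]; omega)]
        have hQj : ((P.set (j+1) (r.getD j 0)).set j (max (a1F t1 c r j) (r.getD j 0 + 1))).getD j 0
            = max (a1F t1 c r j) (r.getD j 0 + 1) := by
          rw [List.getD_eq_getElem?_getD, List.getElem?_set, if_pos rfl,
            if_pos (by simp [hlenP]; omega)]
          rfl
        rw [hQj, List.set_set]
        congr 1
        rw [hP]
        apply rowExt t1 t2 c r j hj _ _ hx
        unfold rowF a2F
        rw [if_pos ⟨h1, h3.1, h3.2⟩]
      · rw [if_neg h3]
        simp only [key1]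
        rw [condSet' dp i (P.set (j+1) (r.getD j 0)) j (r.getD j 0) hi (by simp [hlenP]; omega),
          hP1j]
        congr 1
        rw [hP]
        apply rowExt t1 t2 c r j hj _ _ hx
        unfold rowF a2F
        rw [if_neg (fun hcc => h3 ⟨hcc.2.1, hcc.2.2⟩), max_eq_left (neg_one_le_a1F t1 c r j)]
    · rw [if_neg h2]
      have hx : (-1 : Int) = a1F t1 c r (j+1) := by
        unfold a1F
        rw [if_neg (fun hcc => h2 ⟨by simpa using hcc.2.2.1, by simpa using hcc.2.2.2⟩)]
      simp only [key1]
      by_cases h3 : r.getD j 0 < (t2.length : Int) ∧ t2.getD (r.getD j 0).toNat ' ' = c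
      · rw [if_pos h3, condSet' dp i P j (r.getD j 0 + 1) hi (by omega), hPj]
        simp only [key1]
        rw [condSet' dp i (P.set j (max (a1F t1 c r j) (r.getD j 0 + 1))) j (r.getD j 0) hi
            (by simp [hlenP]; omega)]
        have hQj : (P.set j (max (a1F t1 c r j) (r.getD j 0 + 1))).getD j 0
            = max (a1F t1 c r j) (r.getD j 0 + 1) := by
          rw [List.getD_eq_getElem?_getD, List.getElem?_set, if_pos rfl, if_pos (by omega)]
          rfl
        rw [hQj, List.set_set]
        congr 1
        rw [hP, ← setP_j1 t1 t2 c r j hj]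
        apply rowExt t1 t2 c r j hj _ _ hx
        unfold rowF a2F
        rw [if_pos ⟨h1, h3.1, h3.2⟩]
      · rw [if_neg h3]
        simp only [key1]
        rw [condSet' dp i P j (r.getD j 0) hi (by omega), hPj]
        congr 1
        rw [hP, ← setP_j1 t1 t2 c r j hj]
        apply rowExt t1 t2 c r j hj _ _ hx
        unfold rowF a2F
        rw [if_neg (fun hcc => h3 ⟨hcc.2.1, hcc.2.2⟩), max_eq_left (neg_one_le_a1F t1 c r j)]
  · rw [if_neg h1]
    simp only [key1]
    rw [condSet' dp i P j (r.getD j 0) hi (by omega), hPj]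
    congr 1
    rw [hP, ← setP_j1 t1 t2 c r j hj]
    apply rowExt t1 t2 c r j hj _ _ ?hx
    · unfold rowF a2F
      rw [if_neg (fun hcc => h1 hcc.1), max_eq_left (neg_one_le_a1F t1 c r j)]
    · unfold a1F
      rw [if_neg (fun hcc => h1 (by simpa using hcc.2.1))]
lemma partRow_zero (t1 t2 : List Char) (c : Char) (r : List Int) :
    partRow t1 t2 c r 0 = List.replicate (t1.length + 1) (-1) := by
  apply List.ext_getElem?
  intro k
  rw [partRow_getElem?, List.getElem?_replicate]
  by_cases h : k < t1.length + 1
  · rw [if_pos h, if_pos h, if_neg (by omega)]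
    by_cases h0 : k = 0
    · rw [if_pos h0, h0]
      unfold a1F
      rw [if_neg (by omega)]
    · rw [if_neg h0]
  · rw [if_neg h, if_neg h]

lemma partRow_full (t1 t2 : List Char) (c : Char) (r : List Int) :
    partRow t1 t2 c r (t1.length + 1) = stepRow t1 t2 c r := by
  unfold partRow stepRow
  apply List.map_congr_left
  intro k hk
  rw [if_pos (List.mem_range.mp hk)]

lemma inner_loop (s t1 t2 : List Char) (i : Nat) (dp : List (List Int)) (r : List Int)
    (hi : i + 1 < dp.length) (hri : dp.getD i [] = r)
    (hnext : dp.getD (i+1) [] = List.replicate (t1.length + 1) (-1)) :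
    (List.range (t1.length + 1)).foldl (innerBody s t1 t2 i) dp
      = dp.set (i+1) (stepRow t1 t2 (s.getD i ' ') r) := by
  have hstep : ∀ j, j ≤ t1.length + 1 →
      (List.range j).foldl (innerBody s t1 t2 i) dp
        = dp.set (i+1) (partRow t1 t2 (s.getD i ' ') r j) := by
    intro j
    induction j with
    | zero =>
      intro _
      rw [List.range_zero, List.foldl_nil, partRow_zero, ← hnext,
        set_row_getD_self dp (i+1) (by omega)]
    | succ j ih =>
      intro hj1
      rw [List.range_succ, List.foldl_append, ih (by omega), List.foldl_cons, List.foldl_nil]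
      exact innerBody_step s t1 t2 i dp r j hi hri (by omega)
  rw [hstep (t1.length + 1) le_rfl, partRow_full]

def tblA (s t1 t2 : List Char) (i : Nat) : List (List Int) :=
  (List.range (s.length + 1)).map
    (fun k => if k ≤ i then rowsA t1 t2 (s.take k) else List.replicate (t1.length + 1) (-1))

lemma tblA_getElem? (s t1 t2 : List Char) (i k : Nat) :
    (tblA s t1 t2 i)[k]?
      = if k < s.length + 1
        then some (if k ≤ i then rowsA t1 t2 (s.take k) else List.replicate (t1.length + 1) (-1))
        else none := by
  unfold tblA
  by_cases h : k < s.length + 1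
  · rw [if_pos h, List.getElem?_map, List.getElem?_range h, Option.map_some]
  · rw [if_neg h, List.getElem?_map, List.getElem?_eq_none (by simpa using h), Option.map_none]

lemma tblA_getD (s t1 t2 : List Char) (i k : Nat) (hk : k < s.length + 1) :
    (tblA s t1 t2 i).getD k []
      = if k ≤ i then rowsA t1 t2 (s.take k) else List.replicate (t1.length + 1) (-1) := by
  rw [List.getD_eq_getElem?_getD, tblA_getElem?, if_pos hk]
  rfl

lemma tblA_length (s t1 t2 : List Char) (i : Nat) : (tblA s t1 t2 i).length = s.length + 1 := by
  simp [tblA]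

lemma tblA_set_succ (s t1 t2 : List Char) (i : Nat) (hi : i < s.length) :
    (tblA s t1 t2 i).set (i+1) (rowsA t1 t2 (s.take (i+1))) = tblA s t1 t2 (i+1) := by
  apply List.ext_getElem?
  intro k
  rw [List.getElem?_set, tblA_getElem?, tblA_getElem?]
  by_cases he : i + 1 = k
  · rw [if_pos he, if_pos (by rw [tblA_length]; omega), ← he, if_pos (by omega), if_pos (by omega)]
  · rw [if_neg he]
    by_cases h : k < s.length + 1
    · rw [if_pos h, if_pos h]
      by_cases h2 : k ≤ i
      · rw [if_pos h2, if_pos (by omega)]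
      · rw [if_neg h2, if_neg (by omega)]
    · rw [if_neg h, if_neg h]

lemma outer_loop (s t1 t2 : List Char) :
    ∀ i, i ≤ s.length →
    (List.range i).foldl (outerBody s t1 t2)
        (pvSet2 ((List.range (s.length + 1)).map (fun _ => List.replicate (t1.length + 1) (-1))) 0 0 0)
      = tblA s t1 t2 i := by
  intro i
  induction i with
  | zero =>
    intro _
    rw [List.range_zero, List.foldl_nil]
    unfold pvSet2
    apply List.ext_getElem?
    intro k
    rw [List.getElem?_set, tblA_getElem?]
    have hd : (((List.range (s.length + 1)).map
        (fun _ => List.replicate (t1.length + 1) (-1 : Int)))).getD 0 []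
        = List.replicate (t1.length + 1) (-1 : Int) := by
      rw [List.getD_eq_getElem?_getD, List.getElem?_map, List.getElem?_range (by omega),
        Option.map_some]
      rfl
    by_cases h0 : 0 = k
    · rw [if_pos h0, ← h0, if_pos (by simp), if_pos (by omega), if_pos (by omega), hd]
      rfl
    · rw [if_neg h0, List.getElem?_map]
      by_cases h : k < s.length + 1
      · rw [if_pos h, List.getElem?_range h, Option.map_some, if_neg (by omega)]
      · rw [if_neg h, List.getElem?_eq_none (by simpa using h), Option.map_none]
  | succ i ih =>
    intro hi1
    rw [show List.range (i+1) = List.range i ++ [i] from List.range_succ,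
      List.foldl_append, ih (by omega), List.foldl_cons, List.foldl_nil]
    unfold outerBody
    have hlt : i < s.length := by omega
    rw [inner_loop s t1 t2 i (tblA s t1 t2 i) (rowsA t1 t2 (s.take i))
        (by rw [tblA_length]; omega)
        (by rw [tblA_getD s t1 t2 i i (by omega), if_pos le_rfl])
        (by rw [tblA_getD s t1 t2 i (i+1) (by omega), if_neg (by omega)])]
    have hch : s.getD i ' ' = s[i]'hlt := by
      rw [List.getD_eq_getElem?_getD, List.getElem?_eq_getElem hlt]
      rfl
    have hrow : stepRow t1 t2 (s.getD i ' ') (rowsA t1 t2 (s.take i)) = rowsA t1 t2 (s.take (i+1)) := by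
      rw [hch, List.take_succ_eq_append_getElem hlt]
      unfold rowsA
      rw [List.foldl_append, List.foldl_cons, List.foldl_nil]
    rw [hrow, tblA_set_succ s t1 t2 i hlt]

lemma checkA_eq_rowsA' (s t1 t2 : List Char) :
    checkA s t1 t2 = decide ((rowsA t1 t2 s).getD t1.length 0 = (t2.length : Int)) := by
  unfold checkA
  simp only []
  rw [outer_loop s t1 t2 s.length le_rfl]
  unfold pvGet2
  rw [tblA_getD s t1 t2 s.length s.length (by omega), if_pos le_rfl, List.take_length]

lemma foldl_relInv (t1 t2 : List Char) (s : List Char) (r : List Int) (S : PySem.Set (Int × Int))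
    (h : RelInv t1 t2 r S) :
    RelInv t1 t2 (s.foldl (fun r c => stepRow t1 t2 c r) r)
      (s.foldl (fun S c => stepSet t1 t2 c S) S) := by
  induction s generalizing r S with
  | nil => exact h
  | cons x xs ih =>
    rw [List.foldl_cons, List.foldl_cons]
    exact ih _ _ (RelInv_step' t1 t2 x r S h)

lemma checkA_eq_splittableB' (s t1 t2 : List Char) : checkA s t1 t2 = splittableB s t1 t2 := by
  rw [checkA_eq_rowsA']
  unfold splittableB
  simp only []
  have h0 : RelInv t1 t2 ((List.replicate (t1.length + 1) (-1 : Int)).set 0 0)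
      (PySem.Set.ofList [((0 : Int), (0 : Int))]) := by
    have he : PySem.Set.ofList [((0 : Int), (0 : Int))] = [((0 : Int), (0 : Int))] := rfl
    rw [he]
    exact RelInv_init' t1 t2
  have h := foldl_relInv t1 t2 s _ _ h0
  exact decide_eq_decide.mpr (RelInv_final' t1 t2 _ _ h)

-- ===== VERDICT (by name: the statement is the Claim_ definition above) =====
theorem solve_single_case_spec : Claim_equal_solve_single_case := by
  intro s t _
  unfold Spec_solve_single_case solve_single_case solve_single_case_alt
  have h : (fun i => checkA s.toList (t.toList.take i) (t.toList.drop i))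
       = (fun i => splittableB s.toList (t.toList.take i) (t.toList.drop i)) := by
    funext i
    exact checkA_eq_splittableB' _ _ _
  rw [h]
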